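-- pv_equiv track=rewrite | github.com/sunsu2737/algorithm | VSP/동전뒤집기.py | solution
-- ===== SOURCE A (Python) =====
-- def solution(coin: list, k: int):
--     change_1 = 0
--     change_2 = 0
--     coin2 = coin[::]
--
--     left = 0
--     right = k-1
--
--     while right<len(coin):
--         if coin[left]==0:
--             change_1+=1
--             for i in range(left,right+1):
--                 if coin[i]==1:
--                     coin[i]=0
--                 else:
--                     coin[i]=1
--         if coin2[left]==1:
--             change_2+=1
--             for i in range(left,right+1):
--                 if coin2[i]==1:
--                     coin2[i]=0
--                 else:
--                     coin2[i]=1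
--         left+=1
--         right+=1
--     if 0 in coin and 1 in coin2:
--         return -1
--     elif 0 in coin:
--         return change_2
--     elif 1 in coin2:
--         return change_1
--     else:
--         return min(change_1,change_2)
-- ===== SOURCE B (Python) =====
-- def solution(coin: list, k: int):
--     # Greedy window flips tracked with a difference array of active flip counts,
--     # instead of physically re-flipping each chosen window.  Return value only:
--     # unlike A, this does not mutate the caller's list.
--     n = len(coin)
--
--     def run(t):
--         # flip every window whose current left value equals t; afterwards a
--         # position still equal to t means this pass cannot succeed.
--         ends = [0] * (n + 1)   # ends[j]: number of flip windows ending just before j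
--         active = 0             # flips covering the current position
--         changes = 0
--         bad = False
--         for i in range(n):
--             active -= ends[i]
--             if active == 0:
--                 v = coin[i]
--             elif (active % 2 == 1) != (coin[i] == 1):
--                 v = 1
--             else:
--                 v = 0
--             if v == t:
--                 if i <= n - k:
--                     changes += 1
--                     active += 1
--                     ends[i + k] += 1
--                 else:
--                     bad = True
--         return changes, bad
--
--     c1, b1 = run(0)   # make everything 1
--     c2, b2 = run(1)   # make everything 0
--     if b1 and b2:
--         return -1
--     if b1:
--         return c2
--     if b2:
--         return c1
--     return min(c1, c2)
-- ===== Notes on version B (the rewrite author's own statement) =====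
-- stated objective: alternative
-- what changed: Instead of physically re-flipping every chosen k-length window inside two mutated copies of the list, B runs each of the two greedy passes as a single sweep that tracks the number of flip windows covering the current position with a difference array (ends[]) and reconstructs each coin's current value from its original value and that count; B also does not mutate the caller's list.
import Mathlib
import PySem

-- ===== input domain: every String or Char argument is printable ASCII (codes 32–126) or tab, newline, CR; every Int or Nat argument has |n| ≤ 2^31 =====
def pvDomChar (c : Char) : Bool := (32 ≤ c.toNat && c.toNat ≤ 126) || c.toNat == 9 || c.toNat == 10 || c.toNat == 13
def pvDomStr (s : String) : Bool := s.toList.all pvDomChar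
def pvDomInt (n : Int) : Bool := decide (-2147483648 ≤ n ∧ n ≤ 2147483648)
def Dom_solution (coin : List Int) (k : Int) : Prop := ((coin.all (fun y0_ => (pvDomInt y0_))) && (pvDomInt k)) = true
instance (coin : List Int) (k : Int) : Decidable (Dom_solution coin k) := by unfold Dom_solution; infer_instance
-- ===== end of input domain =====

-- B replaces A's physical window re-flipping with a difference-array sweep; equivalence is about
-- the RETURN value only: Python A mutates its `coin` argument in place, B does not.

-- ===== PORT A =====
-- `if coin[i]==1: coin[i]=0 else: coin[i]=1`
def pyFlip (v : Int) : Int := if v = 1 then 0 else 1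

-- `for i in range(left, right+1): coin[i] = flip(coin[i])`  (flip each index in [left, right])
def flipRange (l r : Int) (xs : List Int) : List Int :=
  xs.mapIdx (fun i v => if l ≤ (i : Int) ∧ (i : Int) ≤ r then pyFlip v else v)

-- the `while right < len(coin)` loop; fuel = len(coin)+1 iterations suffice for k ≥ 1 (Pre_),
-- `coin[left]` is read with `(pyGet? …).getD 0`, exact since 0 ≤ left < len on admitted inputs.
def loopA : List Int → List Int → Int → Int → Int → Int → Nat → List Int × List Int × Int × Int
  | a, b, c1, c2, _, _, 0 => (a, b, c1, c2)
  | a, b, c1, c2, left, right, (fuel+1) =>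
      if right < (a.length : Int) then
        let pa := if (PySem.List.pyGet? a left).getD 0 = 0 then (flipRange left right a, c1 + 1) else (a, c1)
        let pb := if (PySem.List.pyGet? b left).getD 0 = 1 then (flipRange left right b, c2 + 1) else (b, c2)
        loopA pa.1 pb.1 pa.2 pb.2 (left + 1) (right + 1) fuel
      else (a, b, c1, c2)

def solution (coin : List Int) (k : Int) : Int :=
  let r := loopA coin coin 0 0 0 (k - 1) (coin.length + 1)
  if 0 ∈ r.1 ∧ 1 ∈ r.2.1 then -1
  else if 0 ∈ r.1 then r.2.2.2
  else if 1 ∈ r.2.1 then r.2.2.1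
  else min r.2.2.1 r.2.2.2

-- ===== PORT B =====
-- current value of a coin originally v after `active` sequential window flips
def curB (v : Int) (active : Int) : Int :=
  if active = 0 then v
  else if (active % 2 = 1 ↔ v = 1) then 0 else 1

-- one step of Source B's `for i in range(n)` loop; state = (ends, active, changes, bad).
-- `coin[i]` / `ends[i]` are read with getD, exact since 0 ≤ i < n (and i+k ≤ n when taken) on admitted inputs.
def stepB (coin : List Int) (n : Nat) (k t : Int) (st : List Int × Int × Int × Bool) (i : Nat) :
    List Int × Int × Int × Bool :=
  let ends := st.1
  let active := st.2.1 - ends.getD i 0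
  let v := curB (coin.getD i 0) active
  if v = t then
    if (i : Int) ≤ (n : Int) - k then
      (ends.set ((i : Int) + k).toNat (ends.getD ((i : Int) + k).toNat 0 + 1),
       active + 1, st.2.2.1 + 1, st.2.2.2)
    else (ends, active, st.2.2.1, true)
  else (ends, active, st.2.2.1, st.2.2.2)

-- Source B's `run(t)`: returns (changes, bad)
def runB (coin : List Int) (n : Nat) (k t : Int) : Int × Bool :=
  let st := (List.range n).foldl (stepB coin n k t) (List.replicate (n + 1) 0, 0, 0, false)
  (st.2.2.1, st.2.2.2)

def solution_alt (coin : List Int) (k : Int) : Int :=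
  let n := coin.length
  let r1 := runB coin n k 0
  let r2 := runB coin n k 1
  if r1.2 && r2.2 then -1
  else if r1.2 then r2.1
  else if r2.2 then r1.1
  else min r1.1 r2.1

-- ===== PRECONDITION & SPEC =====
-- A raises IndexError (coin[left] with left == len(coin)) whenever k ≤ 0, for EVERY list including [];
-- Pre_ admits exactly the inputs on which A returns, i.e. k ≥ 1.
def Pre_solution (coin : List Int) (k : Int) : Prop := 1 ≤ k
instance (coin : List Int) (k : Int) : Decidable (Pre_solution coin k) := by unfold Pre_solution; infer_instance
def pvWitness_solution : List Int × Int := ([1, 0, 1, 0, 0], 2)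

def Spec_solution (coin : List Int) (k : Int) (out : Int) : Prop := out = solution_alt coin k
instance (coin : List Int) (k : Int) (out : Int) : Decidable (Spec_solution coin k out) := by unfold Spec_solution; infer_instance

-- ===== CLAIM (what is proved, stated in full; the proofs are below) =====
def Claim_equal_solution : Prop := ∀ (coin : List Int) (k : Int), Dom_solution coin k → Pre_solution coin k → Spec_solution coin k (solution coin k)

-- ===== LEMMAS AND PROOFS =====

-- one pass of A's loop (A's while-loop is two independent greedy passes, with trigger value t)
def loopP (t : Int) : List Int → Int → Int → Int → Nat → List Int × Int
  | a, c, _, _, 0 => (a, c)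
  | a, c, left, right, (fuel+1) =>
      if right < (a.length : Int) then
        let pa := if (PySem.List.pyGet? a left).getD 0 = t then (flipRange left right a, c + 1) else (a, c)
        loopP t pa.1 pa.2 (left + 1) (right + 1) fuel
      else (a, c)

-- sum of the difference array from index j on
def endsSum (ends : List Int) (j : Nat) : Int := (ends.drop j).sum

theorem pyFlip_ne_self (t : Int) (ht : t = 0 ∨ t = 1) : pyFlip t ≠ t := by
  rcases ht with h | h <;> simp [pyFlip, h]

theorem flipRange_length (l r : Int) (xs : List Int) : (flipRange l r xs).length = xs.length := by
  simp [flipRange]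

theorem flipRange_getD (l r : Int) (xs : List Int) (i : Nat) (h : i < xs.length) :
    (flipRange l r xs).getD i 0 =
      if l ≤ (i : Int) ∧ (i : Int) ≤ r then pyFlip (xs.getD i 0) else xs.getD i 0 := by
  have h' : i < (flipRange l r xs).length := by simpa [flipRange_length] using h
  rw [List.getD_eq_getElem _ _ h', List.getD_eq_getElem _ _ h]
  simp [flipRange, List.getElem_mapIdx]

theorem curB_zero (v : Int) : curB v 0 = v := by simp [curB]

theorem curB_succ (v f : Int) (hf : 0 ≤ f) : curB v (f + 1) = pyFlip (curB v f) := by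
  have h1 : f % 2 = 0 ∨ f % 2 = 1 := Int.emod_two_eq f
  rcases h1 with hp | hp
  · have hp1 : (f + 1) % 2 = 1 := by omega
    by_cases h0 : f = 0
    · subst h0
      by_cases hv : v = 1 <;> simp [curB, pyFlip, hv]
    · have hne : f + 1 ≠ 0 := by omega
      by_cases hv : v = 1 <;> simp [curB, pyFlip, hv, hp, hp1, h0, hne]
  · have hp1 : (f + 1) % 2 = 0 := by omega
    have h0 : f ≠ 0 := by omega
    have hne : f + 1 ≠ 0 := by omega
    by_cases hv : v = 1 <;> simp [curB, pyFlip, hv, hp, hp1, h0, hne]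

theorem endsSum_step (ends : List Int) (j : Nat) :
    endsSum ends j = ends.getD j 0 + endsSum ends (j + 1) := by
  by_cases h : j < ends.length
  · rw [endsSum, List.drop_eq_getElem_cons h, List.sum_cons, List.getD_eq_getElem _ _ h, endsSum]
  · have h' : ends.length ≤ j := by omega
    rw [endsSum, endsSum, List.drop_eq_nil_of_le h', List.drop_eq_nil_of_le (by omega),
        List.getD_eq_default _ _ h']
    simp

theorem sum_set_int (l : List Int) (n : Nat) (a : Int) (h : n < l.length) :
    (l.set n a).sum = l.sum + (a - l.getD n 0) := by
  induction l generalizing n with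
  | nil => simp at h
  | cons x xs ih =>
    cases n with
    | zero => simp [List.getD]; ring
    | succ m =>
      have hm : m < xs.length := by simpa using h
      simp only [List.set_cons_succ, List.sum_cons, ih m hm, List.getD_cons_succ]
      ring

theorem endsSum_set (ends : List Int) (p j : Nat) (x : Int) (hp : p < ends.length) :
    endsSum (ends.set p x) j =
      if j ≤ p then endsSum ends j + (x - ends.getD p 0) else endsSum ends j := by
  rw [endsSum, List.drop_set, endsSum]
  split_ifs with h1 h2 h2
  · omega
  · rfl
  · have hlen : p - j < (ends.drop j).length := by simp; omega
    rw [sum_set_int _ _ _ hlen]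
    have : (ends.drop j).getD (p - j) 0 = ends.getD p 0 := by
      rw [List.getD_eq_getElem _ _ hlen, List.getD_eq_getElem _ _ hp, List.getElem_drop]
      congr 1
      omega
    rw [this]
  · omega

theorem endsSum_nonneg (ends : List Int) (j : Nat) (h : ∀ x ∈ ends, 0 ≤ x) : 0 ≤ endsSum ends j :=
  List.sum_nonneg (fun x hx => h x (List.mem_of_mem_drop hx))

-- the invariant tying A's mutated array to B's difference-array state before step L
def InvAB (coin : List Int) (t : Int) (L : Nat) (a : List Int) (c : Int)
    (ends : List Int) (active ch : Int) : Prop :=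
  a.length = coin.length ∧
  ends.length = coin.length + 1 ∧
  c = ch ∧
  active = endsSum ends L ∧
  (∀ x ∈ ends, 0 ≤ x) ∧
  (∀ i : Nat, L ≤ i → i < coin.length → a.getD i 0 = curB (coin.getD i 0) (endsSum ends (i + 1))) ∧
  (∀ i : Nat, i < L → a.getD i 0 ≠ t)

-- B's tail: past the last possible window start, steps only accumulate `bad`
theorem tailB (coin : List Int) (k t : Int) :
    ∀ (cnt L : Nat) (ends : List Int) (active ch : Int) (bad : Bool),
      L + cnt = coin.length →
      ((coin.length : Int) + 1 - k).toNat ≤ L →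
      active = endsSum ends L →
      (List.range' L cnt).foldl (stepB coin coin.length k t) (ends, active, ch, bad) =
        (ends, endsSum ends (L + cnt), ch,
          bad || (List.range' L cnt).any
            (fun i => decide (curB (coin.getD i 0) (endsSum ends (i + 1)) = t))) := by
  intro cnt
  induction cnt with
  | zero => intro L ends active ch bad hL hm ha; simp [ha]
  | succ c ih =>
    intro L ends active ch bad hL hm ha
    rw [List.range'_succ, List.foldl_cons]
    have hstep : stepB coin coin.length k t (ends, active, ch, bad) L =
        (ends, endsSum ends (L + 1), ch,
          bad || decide (curB (coin.getD L 0) (endsSum ends (L + 1)) = t)) := by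
      have hnk : ¬ ((L : Int) ≤ (coin.length : Int) - k) := by omega
      have ha' : active - ends.getD L 0 = endsSum ends (L + 1) := by
        rw [ha, endsSum_step ends L]; ring
      by_cases hv : curB (coin.getD L 0) (endsSum ends (L + 1)) = t <;>
        simp [stepB, ha', hv, hnk, -List.getD_eq_getElem?_getD]
    rw [hstep, ih (L + 1) ends _ ch _ (by omega) (by omega) rfl]
    have hc3 : L + 1 + c = L + (c + 1) := by omega
    rw [hc3, List.any_cons]
    cases bad <;> simp

-- the main induction: A's loop and B's sweep make identical flip decisions
theorem mainAB (coin : List Int) (k t : Int) (hk : 1 ≤ k) (ht : t = 0 ∨ t = 1) :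
    ∀ (d L : Nat) (a : List Int) (c : Int) (ends : List Int) (active ch : Int) (fuel : Nat),
      d = ((coin.length : Int) + 1 - k).toNat - L →
      L ≤ ((coin.length : Int) + 1 - k).toNat →
      InvAB coin t L a c ends active ch →
      coin.length + 1 - L ≤ fuel →
      (loopP t a c (L : Int) ((L : Int) + k - 1) fuel).2 =
        ((List.range' L (coin.length - L)).foldl (stepB coin coin.length k t)
          (ends, active, ch, false)).2.2.1 ∧
      ((t ∈ (loopP t a c (L : Int) ((L : Int) + k - 1) fuel).1) ↔
        ((List.range' L (coin.length - L)).foldl (stepB coin coin.length k t)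
          (ends, active, ch, false)).2.2.2 = true) := by
  intro d
  induction d with
  | zero =>
    intro L a c ends active ch fuel hd hLm hInv hfuel
    obtain ⟨hlen, helen, hc, hact, hnn, hvals, hdone⟩ := hInv
    have hmL : ((coin.length : Int) + 1 - k).toNat ≤ L := by omega
    have hLn : L ≤ coin.length := by omega
    have hexit : ¬ ((L : Int) + k - 1 < (a.length : Int)) := by
      rw [hlen]; omega
    have hA : loopP t a c (L : Int) ((L : Int) + k - 1) fuel = (a, c) := by
      cases fuel with
      | zero => rfl
      | succ f => rw [loopP]; simp [hexit]
    rw [hA]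
    rw [tailB coin k t (coin.length - L) L ends active ch false (by omega) hmL hact]
    constructor
    · exact hc
    · simp only [Bool.false_or]
      rw [List.any_eq_true]
      constructor
      · intro hmem
        obtain ⟨i, hi, hgi⟩ := List.mem_iff_getElem.mp hmem
        have hgd : a.getD i 0 = t := by rw [List.getD_eq_getElem _ _ hi, hgi]
        have hiL : L ≤ i := by
          by_contra hlt
          exact hdone i (by omega) hgd
        have hin : i < coin.length := by omega
        refine ⟨i, ?_, ?_⟩
        · rw [List.mem_range'_1]; omega
        · rw [decide_eq_true_iff, ← hvals i hiL hin]; exact hgd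
      · rintro ⟨i, hir, hdec⟩
        rw [List.mem_range'_1] at hir
        rw [decide_eq_true_iff] at hdec
        have hin : i < coin.length := by omega
        have : a.getD i 0 = t := by rw [hvals i (by omega) hin]; exact hdec
        have hia : i < a.length := by omega
        rw [List.getD_eq_getElem _ _ hia] at this
        exact this ▸ List.getElem_mem hia
  | succ d ih =>
    intro L a c ends active ch fuel hd hLm hInv hfuel
    obtain ⟨hlen, helen, hc, hact, hnn, hvals, hdone⟩ := hInv
    have hmpos : 0 < ((coin.length : Int) + 1 - k).toNat := by omega
    have hLm' : L < ((coin.length : Int) + 1 - k).toNat := by omega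
    have hLnk : (L : Int) ≤ (coin.length : Int) - k := by omega
    have hLn : L < coin.length := by omega
    cases fuel with
    | zero => omega
    | succ f =>
      have hcond : ((L : Int) + k - 1 < (a.length : Int)) := by rw [hlen]; omega
      have hget : (PySem.List.pyGet? a (L : Int)).getD 0 = a.getD L 0 := by
        rw [PySem.List.pyGet?_natCast, List.getD_eq_getElem?_getD]
      have haL : a.getD L 0 = curB (coin.getD L 0) (endsSum ends (L + 1)) :=
        hvals L (le_refl L) hLn
      -- B's step
      have hrange : List.range' L (coin.length - L) = L :: List.range' (L + 1) (coin.length - (L + 1)) := by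
        have h1 : coin.length - L = (coin.length - (L + 1)) + 1 := by omega
        rw [h1, List.range'_succ]
      have ha' : active - ends.getD L 0 = endsSum ends (L + 1) := by
        rw [hact, endsSum_step ends L]; ring
      rw [loopP]
      simp only [hcond, if_true]
      rw [hrange, List.foldl_cons]
      by_cases hv : curB (coin.getD L 0) (endsSum ends (L + 1)) = t
      · -- both flip
        have hstep : stepB coin coin.length k t (ends, active, ch, false) L =
            (ends.set ((L : Int) + k).toNat (ends.getD ((L : Int) + k).toNat 0 + 1),
             endsSum ends (L + 1) + 1, ch + 1, false) := by
          simp only [stepB]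
          rw [ha']
          simp only [hLnk, if_true]
          rw [if_pos]
          exact hv
        rw [hstep]
        have hAif : ((PySem.List.pyGet? a (L : Int)).getD 0 = t) := by rw [hget, haL]; exact hv
        simp only [hAif, if_true]
        set p : Nat := ((L : Int) + k).toNat with hpdef
        have hpI : (p : Int) = (L : Int) + k := by omega
        have hplen : p < ends.length := by omega
        set ends' := ends.set p (ends.getD p 0 + 1) with hends'
        have hsum' : ∀ j : Nat, endsSum ends' j =
            if j ≤ p then endsSum ends j + 1 else endsSum ends j := by
          intro j
          rw [hends', endsSum_set ends p j _ hplen]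
          split_ifs <;> ring_nf
        -- new invariant at L+1
        have hInv' : InvAB coin t (L + 1) (flipRange (L : Int) ((L : Int) + k - 1) a) (c + 1)
            ends' (endsSum ends (L + 1) + 1) (ch + 1) := by
          refine ⟨by rw [flipRange_length, hlen], by rw [hends', List.length_set, helen],
            by rw [hc], ?_, ?_, ?_, ?_⟩
          · rw [hsum' (L + 1), if_pos (by omega)]
          · intro x hx
            rcases List.mem_or_eq_of_mem_set (hends' ▸ hx) with h | h
            · exact hnn x h
            · have := hnn (ends.getD p 0) (by
                rw [List.getD_eq_getElem _ _ hplen]; exact List.getElem_mem hplen)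
              omega
          · intro i hi hin
            rw [flipRange_getD _ _ _ _ (by omega), hvals i (by omega) hin, hsum' (i + 1)]
            by_cases hik : i + 1 ≤ p
            · have hflip : (L : Int) ≤ (i : Int) ∧ (i : Int) ≤ (L : Int) + k - 1 := by omega
              rw [if_pos hflip, if_pos hik]
              exact (curB_succ _ _ (endsSum_nonneg ends (i + 1) hnn)).symm
            · have hflip : ¬ ((L : Int) ≤ (i : Int) ∧ (i : Int) ≤ (L : Int) + k - 1) := by omega
              rw [if_neg hflip, if_neg hik]
          · intro i hi
            rcases Nat.lt_succ_iff_lt_or_eq.mp hi with h | h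
            · rw [flipRange_getD _ _ _ _ (by omega), if_neg (by omega)]
              exact hdone i h
            · subst h
              rw [flipRange_getD _ _ _ _ (by omega), if_pos (by omega), haL, hv]
              exact pyFlip_ne_self t ht
        have := ih (L + 1) (flipRange (L : Int) ((L : Int) + k - 1) a) (c + 1) ends'
          (endsSum ends (L + 1) + 1) (ch + 1) f (by omega) (by omega) hInv' (by omega)
        have hcast : ((L + 1 : Nat) : Int) = (L : Int) + 1 := by push_cast; ring
        rw [hcast] at this
        have hcast2 : (L : Int) + 1 + k - 1 = (L : Int) + k - 1 + 1 := by ring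
        rw [hcast2] at this
        exact this
      · -- neither flips
        have hstep : stepB coin coin.length k t (ends, active, ch, false) L =
            (ends, endsSum ends (L + 1), ch, false) := by
          simp only [stepB]
          rw [ha']
          rw [if_neg]
          exact hv
        rw [hstep]
        have hAif : ¬ ((PySem.List.pyGet? a (L : Int)).getD 0 = t) := by rw [hget, haL]; exact hv
        simp only [hAif, if_false]
        have hInv' : InvAB coin t (L + 1) a c ends (endsSum ends (L + 1)) ch := by
          refine ⟨hlen, helen, hc, rfl, hnn, fun i hi hin => hvals i (by omega) hin, ?_⟩
          intro i hi
          rcases Nat.lt_succ_iff_lt_or_eq.mp hi with h | h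
          · exact hdone i h
          · subst h; rw [haL]; exact hv
        have := ih (L + 1) a c ends (endsSum ends (L + 1)) ch f (by omega) (by omega) hInv' (by omega)
        have hcast : ((L + 1 : Nat) : Int) = (L : Int) + 1 := by push_cast; ring
        rw [hcast] at this
        have hcast2 : (L : Int) + 1 + k - 1 = (L : Int) + k - 1 + 1 := by ring
        rw [hcast2] at this
        exact this

-- one whole pass: A's loop on its copy of the list agrees with Source B's run(t)
theorem passAB (coin : List Int) (k t : Int) (hk : 1 ≤ k) (ht : t = 0 ∨ t = 1) :
    (loopP t coin 0 0 (k - 1) (coin.length + 1)).2 = (runB coin coin.length k t).1 ∧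
    ((t ∈ (loopP t coin 0 0 (k - 1) (coin.length + 1)).1) ↔
      (runB coin coin.length k t).2 = true) := by
  have hInv0 : InvAB coin t 0 coin 0 (List.replicate (coin.length + 1) 0) 0 0 := by
    refine ⟨rfl, by simp, rfl, ?_, ?_, ?_, ?_⟩
    · rw [endsSum, List.drop_replicate]; simp
    · intro x hx; rw [List.eq_of_mem_replicate hx]
    · intro i _ _
      rw [endsSum, List.drop_replicate]
      simp [curB_zero]
    · intro i hi; omega
  have h := mainAB coin k t hk ht (((coin.length : Int) + 1 - k).toNat) 0 coin 0
    (List.replicate (coin.length + 1) 0) 0 0 (coin.length + 1) (by omega) (by omega) hInv0 (by omega)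
  have hcast : ((0 : Nat) : Int) = 0 := rfl
  rw [hcast] at h
  have hcast2 : (0 : Int) + k - 1 = k - 1 := by ring
  rw [hcast2] at h
  have hrn : List.range' 0 (coin.length - 0) = List.range coin.length := by
    rw [Nat.sub_zero, List.range_eq_range']
  rw [hrn] at h
  exact h

-- A's single loop is the pair of the two passes
theorem loopA_eq (fuel : Nat) :
    ∀ (a b : List Int) (c1 c2 : Int) (l r : Int), a.length = b.length →
      loopA a b c1 c2 l r fuel =
        ((loopP 0 a c1 l r fuel).1, (loopP 1 b c2 l r fuel).1,
         (loopP 0 a c1 l r fuel).2, (loopP 1 b c2 l r fuel).2) := by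
  induction fuel with
  | zero => intro a b c1 c2 l r _; rfl
  | succ f ih =>
    intro a b c1 c2 l r hab
    rw [loopA, loopP, loopP, ← hab]
    by_cases hcond : r < (a.length : Int)
    · simp only [hcond, if_true]
      by_cases h0 : (PySem.List.pyGet? a l).getD 0 = 0 <;>
        by_cases h1 : (PySem.List.pyGet? b l).getD 0 = 1 <;>
          simp only [h0, h1, if_true, if_false] <;>
            apply ih <;> simp [flipRange_length, hab]
    · simp [hcond]

theorem solution_eq (coin : List Int) (k : Int) (hk : 1 ≤ k) :
    solution coin k = solution_alt coin k := by
  obtain ⟨hc0, hm0⟩ := passAB coin k 0 hk (Or.inl rfl)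
  obtain ⟨hc1, hm1⟩ := passAB coin k 1 hk (Or.inr rfl)
  unfold solution solution_alt
  rw [loopA_eq (coin.length + 1) coin coin 0 0 0 (k - 1) rfl]
  simp only []
  rcases hb0 : (runB coin coin.length k 0).2 <;> rcases hb1 : (runB coin coin.length k 1).2 <;>
    simp_all

-- ===== VERDICT (by name: the statement is the Claim_ definition above) =====
theorem solution_spec : Claim_equal_solution := by
  intro coin k _ hpre
  unfold Spec_solution
  exact solution_eq coin k hpre
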